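-- pv_equiv track=rewrite | github.com/GundalaNikhil/DSA | dsa-problems/verify_stringsclassic_complete.py | diff_substrings_two_strings
-- ===== SOURCE A (Python) =====
-- def build_suffix_array(s):
--     """Build suffix array using doubling algorithm."""
--     n = len(s)
--     suffixes = list(range(n))
--     rank = [ord(c) for c in s]
--     temp_rank = [0] * n
--     k = 1
--
--     while k < n:
--         suffixes.sort(key=lambda i: (rank[i], rank[i + k] if i + k < n else -1))
--
--         temp_rank[suffixes[0]] = 0
--         for i in range(1, n):
--             prev = suffixes[i - 1]
--             curr = suffixes[i]
--             if (rank[curr], rank[curr + k] if curr + k < n else -1) == \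
--                (rank[prev], rank[prev + k] if prev + k < n else -1):
--                 temp_rank[curr] = temp_rank[prev]
--             else:
--                 temp_rank[curr] = temp_rank[prev] + 1
--
--         rank = temp_rank[:]
--         k *= 2
--
--     return suffixes
--
-- def kasai_lcp(s, sa):
--     """Compute LCP array using Kasai's algorithm."""
--     n = len(s)
--     rank = [0] * n
--     for i in range(n):
--         rank[sa[i]] = i
--
--     lcp = [0] * n
--     h = 0
--
--     for i in range(n):
--         if rank[i] > 0:
--             j = sa[rank[i] - 1]
--             while i + h < n and j + h < n and s[i + h] == s[j + h]:
--                 h += 1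
--             lcp[rank[i]] = h
--             if h > 0:
--                 h -= 1
--
--     return lcp
--
-- def count_distinct_substrings(s):
--     """Count distinct substrings using suffix array."""
--     n = len(s)
--     if n == 0:
--         return 0
--
--     sa = build_suffix_array(s)
--     lcp = kasai_lcp(s, sa)
--
--     total = n * (n + 1) // 2
--     duplicates = sum(lcp)
--
--     return total - duplicates
--
-- def diff_substrings_two_strings(s1, s2):
--     """Count substrings in s1 not in s2."""
--     total_s1 = count_distinct_substrings(s1)
--
--     all_substrings_s2 = set()
--     for i in range(len(s2)):
--         for j in range(i + 1, len(s2) + 1):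
--             all_substrings_s2.add(s2[i:j])
--
--     common_distinct = len(set(s1[i:j] for i in range(len(s1)) for j in range(i+1, len(s1)+1)) & all_substrings_s2)
--
--     return total_s1 - common_distinct
-- ===== SOURCE B (Python) =====
-- def diff_substrings_two_strings(s1, s2):
--     """Count substrings in s1 not in s2 (brute-force set difference)."""
--     subs1 = {s1[i:j] for i in range(len(s1)) for j in range(i + 1, len(s1) + 1)}
--     subs2 = {s2[i:j] for i in range(len(s2)) for j in range(i + 1, len(s2) + 1)}
--     return len(subs1 - subs2)
-- ===== Notes on version B (the rewrite author's own statement) =====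
-- stated objective: simpler
-- what changed: Replaced the suffix-array (doubling sort) + Kasai-LCP count of s1's distinct substrings, combined with a set intersection, by a direct set difference of the two brute-force substring sets.
import Mathlib
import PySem

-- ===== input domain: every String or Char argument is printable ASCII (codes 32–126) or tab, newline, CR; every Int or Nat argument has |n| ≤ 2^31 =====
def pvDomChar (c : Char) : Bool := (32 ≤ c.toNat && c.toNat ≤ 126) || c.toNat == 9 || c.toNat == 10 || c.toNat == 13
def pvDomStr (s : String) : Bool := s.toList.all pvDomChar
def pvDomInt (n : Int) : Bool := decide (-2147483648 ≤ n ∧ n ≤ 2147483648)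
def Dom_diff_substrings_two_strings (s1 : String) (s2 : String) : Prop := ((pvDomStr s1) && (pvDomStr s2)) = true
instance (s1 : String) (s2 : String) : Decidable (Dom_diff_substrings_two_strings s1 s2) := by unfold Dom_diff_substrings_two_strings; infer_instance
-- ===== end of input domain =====

-- B replaces A's suffix-array + Kasai-LCP distinct-substring count and set intersection
-- by a direct set difference of the two brute-force substring sets (simpler, same result).

-- ===== PORT A =====
-- helpers transliterate the Python helpers build_suffix_array / kasai_lcp / count_distinct_substrings

-- sort key components: lambda i: (rank[i], rank[i + k] if i + k < n else -1)
def saK1 (rank : List Int) (i : Nat) : Int := rank.getD i 0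
def saK2 (rank : List Int) (n k : Nat) (i : Nat) : Int := if i + k < n then rank.getD (i + k) 0 else -1

-- temp_rank assignment loop (for i in range(1, n))
def saRerank (rank : List Int) (n k : Nat) (suffixes : List Nat) : List Int :=
  let tr0 := (List.replicate n (0 : Int)).set (suffixes.getD 0 0) 0
  (List.range' 1 (n - 1)).foldl (fun tr i =>
    let prev := suffixes.getD (i - 1) 0
    let curr := suffixes.getD i 0
    if (saK1 rank curr, saK2 rank n k curr) = (saK1 rank prev, saK2 rank n k prev)
    then tr.set curr (tr.getD prev 0)
    else tr.set curr (tr.getD prev 0 + 1)) tr0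

-- while k < n: sort; re-rank; k *= 2   (hk only justifies termination)
def saLoop (n : Nat) (rank : List Int) (suffixes : List Nat) (k : Nat) (hk : 0 < k) : List Nat :=
  if h : k < n then
    let s' := PySem.List.sorted2 suffixes (saK1 rank) (saK2 rank n k)
    saLoop n (saRerank rank n k s') s' (2 * k) (by omega)
  else suffixes
termination_by n - k
decreasing_by omega

def buildSuffixArray (cs : List Char) : List Nat :=
  let n := cs.length
  saLoop n (cs.map (fun c => (c.toNat : Int))) (List.range n) 1 (by omega)

-- rank[sa[i]] = i
def kasaiRank (n : Nat) (sa : List Nat) : List Nat :=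
  (List.range n).foldl (fun rk i => rk.set (sa.getD i 0) i) (List.replicate n 0)

-- while i + h < n and j + h < n and s[i+h] == s[j+h]: h += 1
def kasaiH (cs : List Char) (i j h : Nat) : Nat :=
  if i + h < cs.length ∧ j + h < cs.length ∧ cs.getD (i + h) 'a' = cs.getD (j + h) 'a'
  then kasaiH cs i j (h + 1) else h
termination_by cs.length - h
decreasing_by omega

def kasaiLcp (cs : List Char) (sa : List Nat) : List Nat :=
  let n := cs.length
  let rk := kasaiRank n sa
  ((List.range n).foldl (fun (st : List Nat × Nat) i =>
      if 0 < rk.getD i 0 then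
        let j := sa.getD (rk.getD i 0 - 1) 0
        let h' := kasaiH cs i j st.2
        (st.1.set (rk.getD i 0) h', if 0 < h' then h' - 1 else h')
      else st) (List.replicate n 0, 0)).1

def countDistinct (cs : List Char) : Int :=
  let n := cs.length
  if n = 0 then 0 else
    let sa := buildSuffixArray cs
    let lcp := kasaiLcp cs sa
    let total := PySem.Int.floordiv ((n : Int) * ((n : Int) + 1)) 2
    total - (lcp.map (fun (x : Nat) => (x : Int))).sum

-- {s[i:j] for i in range(len(s)) for j in range(i+1, len(s)+1)} (the generated elements, in order)
def subSlices (cs : List Char) : List (List Char) :=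
  (List.range cs.length).flatMap (fun i =>
    (List.range' (i + 1) (cs.length - i)).map (fun (j : Nat) =>
      PySem.List.slice cs (some (i : Int)) (some (j : Int))))

def diff_substrings_two_strings (s1 : String) (s2 : String) : Int :=
  let total1 := countDistinct s1.toList
  let all2 := PySem.Set.ofList (subSlices s2.toList)
  let common := PySem.Set.len ((PySem.Set.ofList (subSlices s1.toList)).inter all2)
  total1 - common

-- ===== PORT B =====
-- B's own substring-set comprehension {s[i:j] for i ... for j ...}
def subSlicesB (cs : List Char) : List (List Char) :=
  (List.range cs.length).flatMap (fun i =>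
    (List.range' (i + 1) (cs.length - i)).map (fun (j : Nat) =>
      PySem.List.slice cs (some (i : Int)) (some (j : Int))))

def diff_substrings_two_strings_alt (s1 : String) (s2 : String) : Int :=
  let subs1 := PySem.Set.ofList (subSlicesB s1.toList)
  let subs2 := PySem.Set.ofList (subSlicesB s2.toList)
  PySem.Set.len (subs1.diff subs2)

-- ===== PRECONDITION & SPEC =====
def Spec_diff_substrings_two_strings (s1 : String) (s2 : String) (out : Int) : Prop := out = diff_substrings_two_strings_alt s1 s2
instance (s1 : String) (s2 : String) (out : Int) : Decidable (Spec_diff_substrings_two_strings s1 s2 out) := by unfold Spec_diff_substrings_two_strings; infer_instance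

-- ===== CLAIM (what is proved, stated in full; the proofs are below) =====
def Claim_equal_diff_substrings_two_strings : Prop := ∀ (s1 : String) (s2 : String), Dom_diff_substrings_two_strings s1 s2 → Spec_diff_substrings_two_strings s1 s2 (diff_substrings_two_strings s1 s2)

-- ===== LEMMAS AND PROOFS =====

-- ---------- generic order facts on List Char ----------

theorem append_lt_append_iff (p a b : List Char) : p ++ a < p ++ b ↔ a < b := by
  induction p with
  | nil => rfl
  | cons x xs ih =>
    constructor
    · intro h
      rcases List.cons_lt_cons_iff.1 h with h' | ⟨_, h'⟩
      · exact absurd h' (lt_irrefl x)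
      · exact ih.1 h'
    · intro h
      exact List.cons_lt_cons_iff.2 (Or.inr ⟨rfl, ih.2 h⟩)

-- suffixes and length-k prefixes of suffixes
def sfx (cs : List Char) (i : Nat) : List Char := cs.drop i

def pk (cs : List Char) (k i : Nat) : List Char := (cs.drop i).take k

theorem pk_split (cs : List Char) (k i : Nat) :
    pk cs (2 * k) i = pk cs k i ++ pk cs k (i + k) := by
  unfold pk
  rw [two_mul, List.take_add, List.drop_drop]

theorem length_pk (cs : List Char) (k i : Nat) : (pk cs k i).length = min k (cs.length - i) := by
  simp [pk]

theorem pk_full (cs : List Char) (k i : Nat) (h : cs.length ≤ k) : pk cs k i = sfx cs i := by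
  unfold pk sfx
  exact List.take_of_length_le (by simp; omega)

theorem sfx_injOn (cs : List Char) (i j : Nat) (hi : i < cs.length) (hj : j < cs.length)
    (h : sfx cs i = sfx cs j) : i = j := by
  have := congrArg List.length h
  simp [sfx] at this
  omega

-- lcp length
def lcpLen : List Char → List Char → Nat
  | a :: as, b :: bs => if a = b then lcpLen as bs + 1 else 0
  | _, _ => 0

theorem lcpLen_le_left (a b : List Char) : lcpLen a b ≤ a.length := by
  induction a generalizing b with
  | nil => simp [lcpLen]
  | cons x xs ih =>
    cases b with
    | nil => simp [lcpLen]
    | cons y ys =>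
      by_cases h : x = y <;> simp [lcpLen, h]
      exact ih ys

theorem lcpLen_le_right (a b : List Char) : lcpLen a b ≤ b.length := by
  induction a generalizing b with
  | nil => simp [lcpLen]
  | cons x xs ih =>
    cases b with
    | nil => simp [lcpLen]
    | cons y ys =>
      by_cases h : x = y <;> simp [lcpLen, h]
      exact ih ys

theorem lcpLen_cons (x : Char) (as bs : List Char) :
    lcpLen (x :: as) (x :: bs) = lcpLen as bs + 1 := by simp [lcpLen]

theorem lcpLen_comm (a b : List Char) : lcpLen a b = lcpLen b a := by
  induction a generalizing b with
  | nil => cases b <;> simp [lcpLen]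
  | cons x xs ih =>
    cases b with
    | nil => simp [lcpLen]
    | cons y ys =>
      by_cases h : x = y
      · subst h
        rw [lcpLen_cons, lcpLen_cons, ih]
      · simp [lcpLen, h, Ne.symm h]

theorem take_lcpLen_eq (a b : List Char) : a.take (lcpLen a b) = b.take (lcpLen a b) := by
  induction a generalizing b with
  | nil => simp [lcpLen]
  | cons x xs ih =>
    cases b with
    | nil => simp [lcpLen]
    | cons y ys =>
      by_cases h : x = y
      · simp [lcpLen, h, ih ys]
      · simp [lcpLen, h]

-- a common prefix is exactly a prefix of length ≤ lcpLen
theorem prefix_both_iff (a b p : List Char) :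
    (p <+: a ∧ p <+: b) ↔ (p <+: a ∧ p.length ≤ lcpLen a b) := by
  constructor
  · rintro ⟨ha, hb⟩
    refine ⟨ha, ?_⟩
    induction p generalizing a b with
    | nil => simp
    | cons c cs ih =>
      cases a with
      | nil => exact absurd (List.IsPrefix.length_le ha) (by simp)
      | cons x xs =>
        cases b with
        | nil => exact absurd (List.IsPrefix.length_le hb) (by simp)
        | cons y ys =>
          obtain ⟨hcx, ha'⟩ := by simpa using ha
          obtain ⟨hcy, hb'⟩ := by simpa using hb
          have hxy : x = y := by rw [← hcx, ← hcy]
          subst hxy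
          rw [lcpLen_cons]
          have := ih _ _ ha' hb'
          simp only [List.length_cons]
          omega
  · rintro ⟨ha, hl⟩
    refine ⟨ha, ?_⟩
    have h1 : p = a.take p.length := List.prefix_iff_eq_take.1 ha
    have h2 : a.take p.length = (a.take (lcpLen a b)).take p.length := by
      rw [List.take_take, min_eq_left hl]
    rw [h1, h2, take_lcpLen_eq a b, List.take_take, min_eq_left hl]
    exact List.take_prefix _ _

theorem cons_le_cons_elim {x y : Char} {xs ys : List Char} (h : x :: xs ≤ y :: ys) :
    x < y ∨ (x = y ∧ xs ≤ ys) := by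
  rcases lt_or_eq_of_le h with h | h
  · rcases List.cons_lt_cons_iff.1 h with h' | ⟨h', h''⟩
    · exact Or.inl h'
    · exact Or.inr ⟨h', le_of_lt h''⟩
  · injection h with h1 h2
    exact Or.inr ⟨h1, le_of_eq h2⟩

-- order betweenness: lcp with the closer string is at least as long
theorem lcpLen_between (a b c : List Char) (hab : a ≤ b) (hbc : b ≤ c) :
    lcpLen a c ≤ lcpLen b c := by
  induction a generalizing b c with
  | nil => simp [lcpLen]
  | cons x xs ih =>
    cases c with
    | nil => simp [lcpLen]
    | cons z zs =>
      cases b with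
      | nil =>
        rcases lt_or_eq_of_le hab with h | h
        · exact absurd h (List.not_lt_nil _)
        · simp at h
      | cons y ys =>
        by_cases hxz : x = z
        · subst hxz
          rcases cons_le_cons_elim hab with h1 | ⟨h1, hab'⟩
          · rcases cons_le_cons_elim hbc with h2 | ⟨h2, -⟩
            · exact absurd (h1.trans h2) (lt_irrefl x)
            · exact absurd (h2 ▸ h1) (lt_irrefl x)
          · subst h1
            rcases cons_le_cons_elim hbc with h2 | ⟨-, hbc'⟩
            · exact absurd h2 (lt_irrefl x)
            · rw [lcpLen_cons, lcpLen_cons]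
              have := ih _ _ hab' hbc'
              omega
        · simp [lcpLen, hxz]

theorem getElem_lt_lcpLen (a b : List Char) (t : Nat) (ht : t < lcpLen a b) :
    ∃ (h1 : t < a.length) (h2 : t < b.length), a[t] = b[t] := by
  induction a generalizing b t with
  | nil => simp [lcpLen] at ht
  | cons x xs ih =>
    cases b with
    | nil => simp [lcpLen] at ht
    | cons y ys =>
      by_cases h : x = y
      · subst h
        rw [lcpLen_cons] at ht
        cases t with
        | zero => exact ⟨by simp, by simp, rfl⟩
        | succ t =>
          obtain ⟨h1, h2, h3⟩ := ih ys t (by omega)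
          exact ⟨by simpa using h1, by simpa using h2, by simpa using h3⟩
      · simp [lcpLen, h] at ht

theorem lcpLen_stop (a b : List Char) (h1 : lcpLen a b < a.length) (h2 : lcpLen a b < b.length) :
    a[lcpLen a b] ≠ b[lcpLen a b] := by
  induction a generalizing b with
  | nil => simp at h1
  | cons x xs ih =>
    cases b with
    | nil => simp at h2
    | cons y ys =>
      by_cases h : x = y
      · subst h
        rw [lcpLen_cons] at h1 h2
        simp only [lcpLen_cons, List.getElem_cons_succ]
        exact ih ys (by simp at h1; omega) (by simp at h2; omega)
      · simpa [lcpLen, h] using h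

-- index characterisation of lcpLen of two suffixes
theorem lcpLen_sfx_lt (cs : List Char) (i j t : Nat) (ht : t < lcpLen (sfx cs i) (sfx cs j)) :
    i + t < cs.length ∧ j + t < cs.length ∧ cs.getD (i + t) 'a' = cs.getD (j + t) 'a' := by
  obtain ⟨h1, h2, h3⟩ := getElem_lt_lcpLen _ _ t ht
  simp only [sfx, List.length_drop] at h1 h2
  have hi : i + t < cs.length := by omega
  have hj : j + t < cs.length := by omega
  refine ⟨hi, hj, ?_⟩
  rw [List.getD_eq_getElem cs 'a' hi, List.getD_eq_getElem cs 'a' hj]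
  simpa [sfx] using h3

theorem lcpLen_sfx_stop (cs : List Char) (i j : Nat) :
    ¬ (i + lcpLen (sfx cs i) (sfx cs j) < cs.length ∧
       j + lcpLen (sfx cs i) (sfx cs j) < cs.length ∧
       cs.getD (i + lcpLen (sfx cs i) (sfx cs j)) 'a' = cs.getD (j + lcpLen (sfx cs i) (sfx cs j)) 'a') := by
  set L := lcpLen (sfx cs i) (sfx cs j) with hL
  rintro ⟨h1, h2, h3⟩
  have hi : L < (sfx cs i).length := by simp [sfx]; omega
  have hj : L < (sfx cs j).length := by simp [sfx]; omega
  have := lcpLen_stop (sfx cs i) (sfx cs j) hi hj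
  apply this
  rw [List.getD_eq_getElem cs 'a' h1, List.getD_eq_getElem cs 'a' h2] at h3
  simp only [sfx, List.getElem_drop]
  exact h3

-- stripping the first (equal) characters of two suffixes
theorem sfx_tail_lt (cs : List Char) (a b : Nat) (ha : a < cs.length) (hb : b < cs.length)
    (hlt : sfx cs a < sfx cs b) (hl : 1 ≤ lcpLen (sfx cs a) (sfx cs b)) :
    sfx cs (a + 1) < sfx cs (b + 1) ∧
    lcpLen (sfx cs a) (sfx cs b) = lcpLen (sfx cs (a + 1)) (sfx cs (b + 1)) + 1 := by
  have hda : sfx cs a = cs[a] :: sfx cs (a + 1) := by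
    simpa [sfx] using List.drop_eq_getElem_cons ha
  have hdb : sfx cs b = cs[b] :: sfx cs (b + 1) := by
    simpa [sfx] using List.drop_eq_getElem_cons hb
  have hhead : cs[a] = cs[b] := by
    obtain ⟨h1, h2, h3⟩ := getElem_lt_lcpLen (sfx cs a) (sfx cs b) 0 (by omega)
    simpa [hda, hdb] using h3
  rw [hda, hdb] at hlt
  rw [hda, hdb, ← hhead, lcpLen_cons]
  rcases List.cons_lt_cons_iff.1 hlt with h | ⟨-, h⟩
  · rw [hhead] at h
    exact absurd h (lt_irrefl _)
  · exact ⟨h, rfl⟩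

-- ---------- the sorted2 call is a sort by the lexicographic pair key ----------

theorem sorted2_eq_sorted_lex {α : Type} (xs : List α) (k1 k2 : α → Int) :
    PySem.List.sorted2 xs k1 k2 = PySem.List.sorted xs (fun x => toLex (k1 x, k2 x)) := by
  have hbe : ∀ a b : α, (decide (k1 a < k1 b) || (!decide (k1 b < k1 a) && decide (k2 a < k2 b)))
      = decide (toLex (k1 a, k2 a) < toLex (k1 b, k2 b)) := by
    intro a b
    by_cases h1 : k1 a < k1 b
    · simp [h1, Prod.Lex.toLex_lt_toLex]
    · by_cases h2 : k1 b < k1 a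
      · simp [h1, h2, Prod.Lex.toLex_lt_toLex]
        omega
      · have he : k1 a = k1 b := le_antisymm (not_lt.1 h2) (not_lt.1 h1)
        simp [Prod.Lex.toLex_lt_toLex, he]
  unfold PySem.List.sorted2 PySem.List.sorted
  simp only [Bool.false_eq_true, if_false]
  congr 1
  funext acc x
  congr 1
  funext a b
  exact hbe a b

-- ---------- rank invariant ----------

def RankOK (cs : List Char) (k : Nat) (rank : List Int) : Prop :=
  rank.length = cs.length ∧
  (∀ i, i < cs.length → 0 ≤ rank.getD i 0) ∧
  (∀ i j, i < cs.length → j < cs.length →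
    (rank.getD i 0 < rank.getD j 0 ↔ pk cs k i < pk cs k j))

theorem rankOK_eq_iff (cs : List Char) (k : Nat) (rank : List Int) (h : RankOK cs k rank)
    (i j : Nat) (hi : i < cs.length) (hj : j < cs.length) :
    (rank.getD i 0 = rank.getD j 0 ↔ pk cs k i = pk cs k j) := by
  rcases h with ⟨-, -, h3⟩
  have hij := h3 i j hi hj
  have hji := h3 j i hj hi
  constructor
  · intro h
    rcases lt_trichotomy (pk cs k i) (pk cs k j) with hc | hc | hc
    · exact absurd (hij.2 hc) (by omega)
    · exact hc
    · exact absurd (hji.2 hc) (by omega)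
  · intro h
    rcases lt_trichotomy (rank.getD i 0) (rank.getD j 0) with hc | hc | hc
    · exact absurd (hij.1 hc) (by simp [h])
    · exact hc
    · exact absurd (hji.1 hc) (by simp [h])

theorem rankOK_base (cs : List Char) : RankOK cs 1 (cs.map (fun c => (c.toNat : Int))) := by
  have hget : ∀ i, i < cs.length → (cs.map (fun c => (c.toNat : Int))).getD i 0 = ((cs.getD i 'a').toNat : Int) := by
    intro i hi
    rw [List.getD_eq_getElem _ _ (by simpa using hi), List.getD_eq_getElem cs 'a' hi]
    simp
  have hpk : ∀ i, i < cs.length → pk cs 1 i = [cs.getD i 'a'] := by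
    intro i hi
    unfold pk
    rw [List.getD_eq_getElem cs 'a' hi, List.drop_eq_getElem_cons hi]
    rfl
  refine ⟨by simp, ?_, ?_⟩
  · intro i hi
    rw [hget i hi]
    positivity
  · intro i j hi hj
    rw [hget i hi, hget j hj, hpk i hi, hpk j hj]
    constructor
    · intro h
      refine List.cons_lt_cons_iff.2 (Or.inl ?_)
      exact_mod_cast h
    · intro h
      rcases List.cons_lt_cons_iff.1 h with h' | ⟨-, h'⟩
      · exact_mod_cast (h' : (cs.getD i 'a').toNat < (cs.getD j 'a').toNat)
      · exact absurd h' (List.not_lt_nil _)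

theorem prefix_le (a b : List Char) (h : a <+: b) : a ≤ b := by
  obtain ⟨t, rfl⟩ := h
  induction a with
  | nil => cases t with
    | nil => simp
    | cons x xs => exact le_of_lt (List.nil_lt_cons x xs)
  | cons x xs ih =>
    rcases lt_or_eq_of_le ih with h | h
    · exact le_of_lt (List.cons_lt_cons_iff.2 (Or.inr ⟨rfl, h⟩))
    · simp only [List.cons_append]
      rw [← h]

theorem lt_append_of_lt_not_prefix (a b x y : List Char) (h : a < b) (hnp : ¬ a <+: b) :
    a ++ x < b ++ y := by
  induction a generalizing b with
  | nil => exact absurd (List.nil_prefix) hnp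
  | cons c csl ih =>
    cases b with
    | nil => exact absurd h (List.not_lt_nil _)
    | cons d ds =>
      rcases List.cons_lt_cons_iff.1 h with h' | ⟨h', h''⟩
      · exact List.cons_lt_cons_iff.2 (Or.inl h')
      · subst h'
        refine List.cons_lt_cons_iff.2 (Or.inr ⟨rfl, ?_⟩)
        exact ih ds h'' (fun hp => hnp (List.cons_prefix_cons.2 ⟨rfl, hp⟩))

theorem pk_nil (cs : List Char) (k i : Nat) (h : cs.length ≤ i) : pk cs k i = [] := by
  unfold pk
  rw [List.drop_eq_nil_iff.2 (by omega)]
  simp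

theorem append_lt_append_iff' (a1 a2 b1 b2 : List Char)
    (ha : a1.length < b1.length → a2 = []) (hb : b1.length < a1.length → b2 = []) :
    a1 ++ a2 < b1 ++ b2 ↔ a1 < b1 ∨ (a1 = b1 ∧ a2 < b2) := by
  have dir : ∀ (a1 a2 b1 b2 : List Char), (a1.length < b1.length → a2 = []) →
      (a1 < b1 ∨ (a1 = b1 ∧ a2 < b2)) → a1 ++ a2 < b1 ++ b2 := by
    intro a1 a2 b1 b2 ha h
    rcases h with h | ⟨rfl, h⟩
    · by_cases hp : a1 <+: b1
      · have hlen : a1.length < b1.length := by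
          rcases Nat.lt_or_ge a1.length b1.length with h' | h'
          · exact h'
          · have := List.IsPrefix.eq_of_length_le hp h'
            exact absurd this (ne_of_lt h)
        rw [ha hlen, List.append_nil]
        calc a1 < b1 := h
          _ ≤ b1 ++ b2 := prefix_le _ _ ⟨b2, rfl⟩
      · exact lt_append_of_lt_not_prefix _ _ _ _ h hp
    · exact (append_lt_append_iff a1 a2 b2).2 h
  constructor
  · intro h
    by_contra hc
    rcases lt_trichotomy a1 b1 with h' | h' | h'
    · exact hc (Or.inl h')
    · subst h'
      rcases lt_trichotomy a2 b2 with h'' | h'' | h''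
      · exact hc (Or.inr ⟨rfl, h''⟩)
      · subst h''
        exact absurd h (lt_irrefl _)
      · have := dir a1 b2 a1 a2 (by omega) (Or.inr ⟨rfl, h''⟩)
        exact absurd (h.trans this) (lt_irrefl _)
    · have := dir b1 b2 a1 a2 (fun hl => hb hl) (Or.inl h')
      exact absurd (h.trans this) (lt_irrefl _)
  · exact dir a1 a2 b1 b2 ha

-- second key component, once the first components agree
theorem key2_iff (cs : List Char) (k : Nat) (hk : 0 < k) (rank : List Int)
    (h : RankOK cs k rank) (i j : Nat) (hi : i < cs.length) (hj : j < cs.length)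
    (heq : pk cs k i = pk cs k j) :
    (saK2 rank cs.length k i < saK2 rank cs.length k j ↔ pk cs k (i + k) < pk cs k (j + k)) ∧
    (saK2 rank cs.length k i = saK2 rank cs.length k j ↔ pk cs k (i + k) = pk cs k (j + k)) := by
  obtain ⟨hlen, hnn, h3⟩ := h
  have hle := congrArg List.length heq
  rw [length_pk, length_pk] at hle
  unfold saK2
  by_cases hik : i + k < cs.length
  · by_cases hjk : j + k < cs.length
    · rw [if_pos hik, if_pos hjk]
      exact ⟨h3 _ _ hik hjk, rankOK_eq_iff cs k rank ⟨hlen, hnn, h3⟩ _ _ hik hjk⟩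
    · -- j + k = cs.length exactly, so pk (j+k) = [] and pk (i+k) ≠ []
      have hjk' : cs.length ≤ j + k := by omega
      have hmin : min k (cs.length - j) = cs.length - j := by omega
      have hji : min k (cs.length - i) = cs.length - j := by omega
      have : ¬ i + k < cs.length → False := by omega
      -- since i + k < cs.length, min k (cs.length - i) = k, so cs.length - j = k, j + k = cs.length
      have hkeq : cs.length - j = k := by omega
      have hpkj : pk cs k (j + k) = [] := pk_nil cs k (j + k) (by omega)
      have hne : pk cs k (i + k) ≠ [] := by
        have : (pk cs k (i + k)).length = min k (cs.length - (i + k)) := length_pk ..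
        intro hcon
        rw [hcon] at this
        simp at this
        omega
      rw [if_pos hik, if_neg hjk, hpkj]
      constructor
      · constructor
        · intro hlt
          have := hnn (i + k) hik
          omega
        · intro hlt
          exact absurd hlt (List.not_lt_nil _)
      · constructor
        · intro heq2
          have := hnn (i + k) hik
          omega
        · intro heq2
          exact absurd heq2 hne
  · by_cases hjk : j + k < cs.length
    · have hik' : cs.length ≤ i + k := by omega
      have hkeq : cs.length - i = k := by omega
      have hpki : pk cs k (i + k) = [] := pk_nil cs k (i + k) (by omega)
      have hne : pk cs k (j + k) ≠ [] := by
        have : (pk cs k (j + k)).length = min k (cs.length - (j + k)) := length_pk ..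
        intro hcon
        rw [hcon] at this
        simp at this
        omega
      rw [if_neg hik, if_pos hjk, hpki]
      have hnnj := hnn (j + k) hjk
      constructor
      · constructor
        · intro _
          cases hpk : pk cs k (j + k) with
          | nil => exact absurd hpk hne
          | cons x xs => exact List.nil_lt_cons x xs
        · intro _
          omega
      · constructor
        · intro heq2
          omega
        · intro heq2
          exact absurd heq2.symm hne
    · rw [if_neg hik, if_neg hjk]
      have h1 : pk cs k (i + k) = [] := pk_nil cs k (i + k) (by omega)
      have h2 : pk cs k (j + k) = [] := pk_nil cs k (j + k) (by omega)
      rw [h1, h2]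
      simp

-- the pair key orders suffixes by their length-2k prefixes
theorem keyLt_iff (cs : List Char) (k : Nat) (hk : 0 < k) (rank : List Int)
    (h : RankOK cs k rank) (i j : Nat) (hi : i < cs.length) (hj : j < cs.length) :
    (toLex (saK1 rank i, saK2 rank cs.length k i) < toLex (saK1 rank j, saK2 rank cs.length k j)
      ↔ pk cs (2 * k) i < pk cs (2 * k) j) := by
  obtain ⟨hlen, hnn, h3⟩ := h
  rw [Prod.Lex.toLex_lt_toLex, pk_split, pk_split]
  rw [append_lt_append_iff']
  · have e1 : (saK1 rank i < saK1 rank j) ↔ pk cs k i < pk cs k j := h3 i j hi hj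
    constructor
    · rintro (h' | ⟨h', h''⟩)
      · exact Or.inl (e1.1 h')
      · have heq : pk cs k i = pk cs k j :=
          (rankOK_eq_iff cs k rank ⟨hlen, hnn, h3⟩ i j hi hj).1 h'
        exact Or.inr ⟨heq, ((key2_iff cs k hk rank ⟨hlen, hnn, h3⟩ i j hi hj heq).1).1 h''⟩
    · rintro (h' | ⟨h', h''⟩)
      · exact Or.inl (e1.2 h')
      · refine Or.inr ⟨(rankOK_eq_iff cs k rank ⟨hlen, hnn, h3⟩ i j hi hj).2 h', ?_⟩
        exact ((key2_iff cs k hk rank ⟨hlen, hnn, h3⟩ i j hi hj h').1).2 h''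
  · intro hl
    rw [length_pk, length_pk] at hl
    exact pk_nil cs k (i + k) (by omega)
  · intro hl
    rw [length_pk, length_pk] at hl
    exact pk_nil cs k (j + k) (by omega)

theorem keyEq_iff (cs : List Char) (k : Nat) (hk : 0 < k) (rank : List Int)
    (h : RankOK cs k rank) (i j : Nat) (hi : i < cs.length) (hj : j < cs.length) :
    ((saK1 rank i, saK2 rank cs.length k i) = (saK1 rank j, saK2 rank cs.length k j)
      ↔ pk cs (2 * k) i = pk cs (2 * k) j) := by
  rw [Prod.mk.injEq, pk_split, pk_split]
  constructor
  · rintro ⟨h1, h2⟩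
    have heq : pk cs k i = pk cs k j := (rankOK_eq_iff cs k rank h i j hi hj).1 h1
    rw [heq, ((key2_iff cs k hk rank h i j hi hj heq).2).1 h2]
  · intro h'
    have hl := congrArg List.length h'
    rw [List.length_append, List.length_append, length_pk, length_pk, length_pk, length_pk] at hl
    have heq : pk cs k i = pk cs k j := by
      have h1 : min k (cs.length - i) = min k (cs.length - j) := by omega
      have := List.append_inj h' (by rw [length_pk, length_pk, h1])
      exact this.1
    have h2 : pk cs k (i + k) = pk cs k (j + k) := by
      have := List.append_inj h' (by rw [length_pk, length_pk]; omega)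
      exact this.2
    refine ⟨(rankOK_eq_iff cs k rank h i j hi hj).2 heq, ((key2_iff cs k hk rank h i j hi hj heq).2).2 h2⟩

-- ---------- re-ranking ----------

-- dense ranks along the sorted list
def drS (key : Nat → Int × Int) (S : List Nat) : Nat → Int
  | 0 => 0
  | p + 1 => drS key S p + (if key (S.getD (p + 1) 0) = key (S.getD p 0) then 0 else 1)

theorem getD_set_ne' (l : List Int) (i j : Nat) (v : Int) (h : i ≠ j) :
    (l.set i v).getD j 0 = l.getD j 0 := by
  simp [List.getD, List.getElem?_set_ne h]

theorem getD_set_self' (l : List Int) (i : Nat) (v : Int) (h : i < l.length) :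
    (l.set i v).getD i 0 = v := by
  simp [List.getD, h]

-- all positions written by saRerank, described along the sorted list S
theorem saRerank_aux (cs : List Char) (k : Nat) (rank : List Int) (S : List Nat)
    (hlen : S.length = cs.length) (hnodup : S.Nodup) (hmem : ∀ x ∈ S, x < cs.length) :
    ∀ m, m ≤ cs.length - 1 →
      (((List.range' 1 m).foldl (fun tr i =>
          if (saK1 rank (S.getD i 0), saK2 rank cs.length k (S.getD i 0))
             = (saK1 rank (S.getD (i - 1) 0), saK2 rank cs.length k (S.getD (i - 1) 0))
          then tr.set (S.getD i 0) (tr.getD (S.getD (i - 1) 0) 0)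
          else tr.set (S.getD i 0) (tr.getD (S.getD (i - 1) 0) 0 + 1))
          ((List.replicate cs.length (0 : Int)).set (S.getD 0 0) 0)).length = cs.length ∧
       ∀ p, p ≤ m → p < cs.length →
        ((List.range' 1 m).foldl (fun tr i =>
          if (saK1 rank (S.getD i 0), saK2 rank cs.length k (S.getD i 0))
             = (saK1 rank (S.getD (i - 1) 0), saK2 rank cs.length k (S.getD (i - 1) 0))
          then tr.set (S.getD i 0) (tr.getD (S.getD (i - 1) 0) 0)
          else tr.set (S.getD i 0) (tr.getD (S.getD (i - 1) 0) 0 + 1))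
          ((List.replicate cs.length (0 : Int)).set (S.getD 0 0) 0)).getD (S.getD p 0) 0
          = drS (fun i => (saK1 rank i, saK2 rank cs.length k i)) S p) := by
  have hgetS : ∀ p (hp : p < cs.length), S.getD p 0 = S[p]'(by rw [hlen]; omega) := by
    intro p hp
    exact List.getD_eq_getElem S 0 (by rw [hlen]; omega)
  have hSlt : ∀ p, p < cs.length → S.getD p 0 < cs.length := by
    intro p hp
    rw [hgetS p hp]
    exact hmem _ (List.getElem_mem _)
  have hSne : ∀ p q, p < cs.length → q < cs.length → p ≠ q → S.getD p 0 ≠ S.getD q 0 := by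
    intro p q hp hq hne
    rw [hgetS p hp, hgetS q hq]
    exact fun hc => hne (hnodup.getElem_inj_iff.1 hc)
  intro m
  induction m with
  | zero =>
    intro _
    constructor
    · simp
    · intro p hp0 hp
      interval_cases p
      rw [List.set_replicate_self]
      simp [drS, List.getD, List.getElem?_replicate]
      split <;> simp
  | succ m ih =>
    intro hm
    obtain ⟨ihlen, ihget⟩ := ih (by omega)
    rw [List.range'_1_concat, List.foldl_append]
    set tr := (List.range' 1 m).foldl _ _ with htr
    constructor
    · simp only [List.foldl_cons, List.foldl_nil]
      split <;> simp [ihlen]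
    · intro p hp hplt
      simp only [List.foldl_cons, List.foldl_nil]
      have hmn : m < cs.length := by omega
      have hm1n : 1 + m < cs.length := by omega
      have hprev : (1 + m) - 1 = m := by omega
      rcases Nat.lt_or_ge p (m + 1) with hpm | hpm
      · -- p ≤ m : untouched position
        have hne : S.getD (1 + m) 0 ≠ S.getD p 0 := hSne _ _ hm1n hplt (by omega)
        have base : tr.getD (S.getD p 0) 0 = drS (fun i => (saK1 rank i, saK2 rank cs.length k i)) S p :=
          ihget p (by omega) hplt
        rw [hprev]
        split <;> (rw [getD_set_ne' _ _ _ _ hne]; exact base)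
      · have hp1 : p = m + 1 := by omega
        subst hp1
        have hcur : S.getD (m + 1) 0 < tr.length := by
          rw [ihlen]
          exact hSlt _ (by omega)
        have base : tr.getD (S.getD m 0) 0 = drS (fun i => (saK1 rank i, saK2 rank cs.length k i)) S m :=
          ihget m (by omega) (by omega)
        have h1m : (1 + m : Nat) = m + 1 := by omega
        rw [hprev]
        simp only [drS, h1m]
        split
        · rw [getD_set_self' _ _ _ hcur, base]
          omega
        · rw [getD_set_self' _ _ _ hcur, base]

theorem drS_nonneg (key : Nat → Int × Int) (S : List Nat) (p : Nat) : 0 ≤ drS key S p := by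
  induction p with
  | zero => simp [drS]
  | succ p ih =>
    simp only [drS]
    split <;> omega

theorem drS_mono (key : Nat → Int × Int) (S : List Nat) (p q : Nat) (h : p ≤ q) :
    drS key S p ≤ drS key S q := by
  induction q with
  | zero => simp_all
  | succ q ih =>
    rcases Nat.lt_or_ge p (q + 1) with h' | h'
    · have := ih (by omega)
      simp only [drS]
      split <;> omega
    · have : p = q + 1 := by omega
      subst this
      exact le_refl _

theorem drS_eq_of_keyEq (key : Nat → Int × Int) (S : List Nat)
    (hadj : ∀ r, r + 1 < S.length → toLex (key (S.getD r 0)) ≤ toLex (key (S.getD (r + 1) 0)))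
    (p q : Nat) (hpq : p ≤ q) (hq : q < S.length)
    (hk : toLex (key (S.getD p 0)) = toLex (key (S.getD q 0))) :
    drS key S p = drS key S q := by
  induction q with
  | zero =>
    have : p = 0 := by omega
    subst this
    rfl
  | succ q ih =>
    rcases Nat.lt_or_ge p (q + 1) with h' | h'
    · have h1 : toLex (key (S.getD p 0)) ≤ toLex (key (S.getD q 0)) := by
        rcases Nat.lt_or_ge p q with h'' | h''
        · -- chain of adjacents: prove by an inner induction
          clear hk ih
          have : ∀ d, p + d ≤ q → toLex (key (S.getD p 0)) ≤ toLex (key (S.getD (p + d) 0)) := by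
            intro d
            induction d with
            | zero => simp
            | succ d ihd =>
              intro hd
              refine le_trans (ihd (by omega)) ?_
              have h5 := hadj (p + d) (by omega)
              have h6 : p + d + 1 = p + (d + 1) := by omega
              rw [h6] at h5
              exact h5
          have h2 := this (q - p) (by omega)
          have h3 : p + (q - p) = q := by omega
          rw [h3] at h2
          exact h2
        · have : p = q := by omega
          subst this
          exact le_refl _
      have h2 : toLex (key (S.getD q 0)) ≤ toLex (key (S.getD (q + 1) 0)) := hadj q (by omega)
      have hqe : toLex (key (S.getD q 0)) = toLex (key (S.getD (q + 1) 0)) := by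
        apply le_antisymm h2
        rw [← hk]
        exact h1
      have hpe : toLex (key (S.getD p 0)) = toLex (key (S.getD q 0)) := by
        rw [hk, hqe]
      have := ih (by omega) (by omega) hpe
      simp only [drS]
      rw [if_pos (toLex.injective hqe.symm)]
      omega
    · have : p = q + 1 := by omega
      subst this
      rfl

theorem drS_lt_of_keyLt (key : Nat → Int × Int) (S : List Nat)
    (hadj : ∀ r, r + 1 < S.length → toLex (key (S.getD r 0)) ≤ toLex (key (S.getD (r + 1) 0)))
    (p q : Nat) (hpq : p < q) (hq : q < S.length)
    (hk : toLex (key (S.getD p 0)) < toLex (key (S.getD q 0))) :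
    drS key S p < drS key S q := by
  induction q with
  | zero => omega
  | succ q ih =>
    by_cases he : toLex (key (S.getD (q + 1) 0)) = toLex (key (S.getD q 0))
    · have hpq' : p < q := by
        rcases Nat.lt_or_ge p q with h' | h'
        · exact h'
        · have : p = q := by omega
          subst this
          rw [he] at hk
          exact absurd hk (lt_irrefl _)
      rw [he] at hk
      have := ih hpq' (by omega) hk
      simp only [drS]
      rw [if_pos (toLex.injective he)]
      omega
    · have h1 : drS key S p ≤ drS key S q := drS_mono key S p q (by omega)
      simp only [drS]
      rw [if_neg (fun hc => he (congrArg toLex hc))]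
      omega

theorem drS_lt_iff (key : Nat → Int × Int) (S : List Nat)
    (hadj : ∀ r, r + 1 < S.length → toLex (key (S.getD r 0)) ≤ toLex (key (S.getD (r + 1) 0)))
    (p q : Nat) (hp : p < S.length) (hq : q < S.length) :
    (drS key S p < drS key S q ↔ toLex (key (S.getD p 0)) < toLex (key (S.getD q 0))) := by
  have hle : ∀ a b : Nat, a ≤ b → b < S.length → toLex (key (S.getD a 0)) ≤ toLex (key (S.getD b 0)) := by
    intro a b hab hb
    have : ∀ d, a + d ≤ b → toLex (key (S.getD a 0)) ≤ toLex (key (S.getD (a + d) 0)) := by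
      intro d
      induction d with
      | zero => simp
      | succ d ihd =>
        intro hd
        refine le_trans (ihd (by omega)) ?_
        have h5 := hadj (a + d) (by omega)
        have h6 : a + d + 1 = a + (d + 1) := by omega
        rw [h6] at h5
        exact h5
    have h2 := this (b - a) (by omega)
    have h3 : a + (b - a) = b := by omega
    rw [h3] at h2
    exact h2
  constructor
  · intro h
    rcases lt_trichotomy (toLex (key (S.getD p 0))) (toLex (key (S.getD q 0))) with h' | h' | h'
    · exact h'
    · rcases Nat.lt_or_ge p q with h'' | h''
      · exact absurd (drS_eq_of_keyEq key S hadj p q (by omega) hq h') (by omega)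
      · exact absurd (drS_eq_of_keyEq key S hadj q p (by omega) hp h'.symm) (by omega)
    · have hqp : q < p := by
        rcases lt_trichotomy p q with h'' | h'' | h''
        · exact absurd (hle p q (le_of_lt h'') hq) (not_le_of_gt h')
        · subst h''
          exact absurd h' (lt_irrefl _)
        · exact h''
      exact absurd (drS_lt_of_keyLt key S hadj q p hqp hp h') (by omega)
  · intro h
    have hpq : p < q := by
      rcases lt_trichotomy p q with h'' | h'' | h''
      · exact h''
      · subst h''
        exact absurd h (lt_irrefl _)
      · exact absurd (hle q p (le_of_lt h'') hp) (not_le_of_gt h)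
    exact drS_lt_of_keyLt key S hadj p q hpq hq h

theorem saRerank_getD (cs : List Char) (k : Nat) (rank : List Int) (S : List Nat)
    (hperm : S.Perm (List.range cs.length)) (p : Nat) (hp : p < cs.length) :
    (saRerank rank cs.length k S).getD (S.getD p 0) 0
      = drS (fun i => (saK1 rank i, saK2 rank cs.length k i)) S p := by
  have hlen : S.length = cs.length := by
    rw [hperm.length_eq, List.length_range]
  have hnodup : S.Nodup := hperm.nodup_iff.2 (List.nodup_range)
  have hmem : ∀ x ∈ S, x < cs.length := by
    intro x hx
    have := hperm.mem_iff.1 hx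
    simpa using this
  have := (saRerank_aux cs k rank S hlen hnodup hmem (cs.length - 1) (le_refl _)).2 p (by omega) hp
  unfold saRerank
  exact this

theorem foldl_set_length (l : List Int) (idx : List Nat) (f : List Int → Nat → List Int)
    (hf : ∀ tr i, (f tr i).length = tr.length) :
    (idx.foldl f l).length = l.length := by
  induction idx generalizing l with
  | nil => rfl
  | cons x xs ih => rw [List.foldl_cons, ih, hf]

theorem length_saRerank (cs : List Char) (k : Nat) (rank : List Int) (S : List Nat) :
    (saRerank rank cs.length k S).length = cs.length := by
  unfold saRerank
  rw [foldl_set_length]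
  · simp
  · intro tr i
    dsimp only
    split <;> simp

theorem rankOK_step (cs : List Char) (k : Nat) (hk : 0 < k) (rank : List Int)
    (h : RankOK cs k rank) (S : List Nat) (hperm : S.Perm (List.range cs.length))
    (hsorted : S.Pairwise (fun a b =>
      toLex (saK1 rank a, saK2 rank cs.length k a) ≤ toLex (saK1 rank b, saK2 rank cs.length k b))) :
    RankOK cs (2 * k) (saRerank rank cs.length k S) := by
  have hlenS : S.length = cs.length := by
    rw [hperm.length_eq, List.length_range]
  have hmemS : ∀ x ∈ S, x < cs.length := by
    intro x hx
    simpa using hperm.mem_iff.1 hx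
  have hadj : ∀ r, r + 1 < S.length →
      toLex ((fun i => (saK1 rank i, saK2 rank cs.length k i)) (S.getD r 0))
        ≤ toLex ((fun i => (saK1 rank i, saK2 rank cs.length k i)) (S.getD (r + 1) 0)) := by
    intro r hr
    have h1 := List.pairwise_iff_getElem.1 hsorted r (r + 1) (by omega) hr (by omega)
    rw [List.getD_eq_getElem S 0 (by omega), List.getD_eq_getElem S 0 hr]
    exact h1
  have hidx : ∀ i, i < cs.length → ∃ p, ∃ (hp : p < S.length), S.getD p 0 = i := by
    intro i hi
    have : i ∈ S := hperm.mem_iff.2 (by simpa using hi)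
    obtain ⟨p, hp, hval⟩ := List.mem_iff_getElem.1 this
    exact ⟨p, hp, by rw [List.getD_eq_getElem S 0 hp]; exact hval⟩
  refine ⟨length_saRerank cs k rank S, ?_, ?_⟩
  · intro i hi
    obtain ⟨p, hp, hval⟩ := hidx i hi
    rw [← hval, saRerank_getD cs k rank S hperm p (by omega)]
    exact drS_nonneg _ S p
  · intro i j hi hj
    obtain ⟨p, hp, hvp⟩ := hidx i hi
    obtain ⟨q, hq, hvq⟩ := hidx j hj
    rw [← hvp, ← hvq, saRerank_getD cs k rank S hperm p (by omega),
        saRerank_getD cs k rank S hperm q (by omega)]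
    rw [drS_lt_iff _ S hadj p q hp hq]
    have hplt : S.getD p 0 < cs.length := by rw [hvp]; exact hi
    have hqlt : S.getD q 0 < cs.length := by rw [hvq]; exact hj
    exact keyLt_iff cs k hk rank h (S.getD p 0) (S.getD q 0) hplt hqlt

-- ---------- the doubling loop ----------

theorem saLoop_sorted_fuel (cs : List Char) : ∀ (f : Nat) (k : Nat) (hk : 0 < k) (rank : List Int) (S : List Nat),
    cs.length - k ≤ f → k < cs.length → RankOK cs k rank → S.Perm (List.range cs.length) →
    (saLoop cs.length rank S k hk).Perm (List.range cs.length) ∧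
    (saLoop cs.length rank S k hk).Pairwise (fun a b => sfx cs a < sfx cs b) := by
  intro f
  induction f with
  | zero =>
    intro k hk rank S hf hkn hrank hperm
    omega
  | succ f ih =>
    intro k hk rank S hf hkn hrank hperm
    rw [saLoop, dif_pos hkn]
    set S' := PySem.List.sorted2 S (saK1 rank) (saK2 rank cs.length k) with hS'
    have hS'eq : S' = PySem.List.sorted S (fun x => toLex (saK1 rank x, saK2 rank cs.length k x)) := by
      rw [hS', sorted2_eq_sorted_lex]
    have hS'perm : S'.Perm (List.range cs.length) := by
      rw [hS'eq]
      exact (PySem.List.sorted_perm _ _ _).trans hperm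
    have hS'sorted : S'.Pairwise (fun a b =>
        toLex (saK1 rank a, saK2 rank cs.length k a) ≤ toLex (saK1 rank b, saK2 rank cs.length k b)) := by
      rw [hS'eq]
      exact PySem.List.sorted_pairwise S _
    have htr : RankOK cs (2 * k) (saRerank rank cs.length k S') :=
      rankOK_step cs k hk rank hrank S' hS'perm hS'sorted
    by_cases h2k : 2 * k < cs.length
    · exact ih (2 * k) (by omega) _ S' (by omega) h2k htr hS'perm
    · rw [saLoop, dif_neg h2k]
      refine ⟨hS'perm, ?_⟩
      have hnodup : S'.Nodup := hS'perm.nodup_iff.2 (List.nodup_range)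
      have hmem : ∀ x ∈ S', x < cs.length := by
        intro x hx
        simpa using hS'perm.mem_iff.1 hx
      rw [List.pairwise_iff_getElem]
      intro p q hp hq hpq
      have hle := List.pairwise_iff_getElem.1 hS'sorted p q hp hq hpq
      have hplt : S'[p] < cs.length := hmem _ (List.getElem_mem _)
      have hqlt : S'[q] < cs.length := hmem _ (List.getElem_mem _)
      have hne : S'[p] ≠ S'[q] := fun hc => (by omega : p ≠ q) (hnodup.getElem_inj_iff.1 hc)
      have hfull : cs.length ≤ 2 * k := by omega
      rcases lt_or_eq_of_le hle with hlt | heq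
      · have := (keyLt_iff cs k hk rank hrank _ _ hplt hqlt).1 hlt
        rw [pk_full cs (2*k) _ hfull, pk_full cs (2*k) _ hfull] at this
        exact this
      · have := (keyEq_iff cs k hk rank hrank _ _ hplt hqlt).1 (toLex.injective heq)
        rw [pk_full cs (2*k) _ hfull, pk_full cs (2*k) _ hfull] at this
        exact absurd (sfx_injOn cs _ _ hplt hqlt this) hne

theorem buildSuffixArray_spec (cs : List Char) :
    (buildSuffixArray cs).Perm (List.range cs.length) ∧
    (buildSuffixArray cs).Pairwise (fun a b => sfx cs a < sfx cs b) := by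
  unfold buildSuffixArray
  by_cases h1 : 1 < cs.length
  · exact saLoop_sorted_fuel cs (cs.length - 1) 1 (by omega) _ _ (by omega) h1
      (rankOK_base cs) (List.Perm.refl _)
  · rw [saLoop, dif_neg (by omega)]
    refine ⟨List.Perm.refl _, ?_⟩
    interval_cases h : cs.length <;> simp [List.range_succ]

-- ---------- Kasai ----------

theorem getD_set_ne2 {α : Type} (l : List α) (i j : Nat) (v d : α) (h : i ≠ j) :
    (l.set i v).getD j d = l.getD j d := by
  simp [List.getD, List.getElem?_set_ne h]

theorem getD_set_self2 {α : Type} (l : List α) (i : Nat) (v d : α) (h : i < l.length) :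
    (l.set i v).getD i d = v := by
  simp [List.getD, h]

theorem kasaiRank_aux (cs : List Char) (sa : List Nat)
    (hlen : sa.length = cs.length) (hnodup : sa.Nodup) (hmem : ∀ x ∈ sa, x < cs.length) :
    ∀ m, m ≤ cs.length →
      (((List.range m).foldl (fun rk i => rk.set (sa.getD i 0) i) (List.replicate cs.length 0)).length = cs.length ∧
       ∀ p, p < m →
        ((List.range m).foldl (fun rk i => rk.set (sa.getD i 0) i) (List.replicate cs.length 0)).getD (sa.getD p 0) 0 = p) := by
  have hgetS : ∀ p (hp : p < cs.length), sa.getD p 0 = sa[p]'(by rw [hlen]; omega) := by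
    intro p hp
    exact List.getD_eq_getElem sa 0 (by rw [hlen]; omega)
  have hSlt : ∀ p, p < cs.length → sa.getD p 0 < cs.length := by
    intro p hp
    rw [hgetS p hp]
    exact hmem _ (List.getElem_mem _)
  have hSne : ∀ p q, p < cs.length → q < cs.length → p ≠ q → sa.getD p 0 ≠ sa.getD q 0 := by
    intro p q hp hq hne
    rw [hgetS p hp, hgetS q hq]
    exact fun hc => hne (hnodup.getElem_inj_iff.1 hc)
  intro m
  induction m with
  | zero =>
    intro _
    exact ⟨by simp, by omega⟩
  | succ m ih =>
    intro hm
    obtain ⟨ihlen, ihget⟩ := ih (by omega)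
    rw [List.range_succ, List.foldl_append, List.foldl_cons, List.foldl_nil]
    constructor
    · rw [List.length_set]
      exact ihlen
    · intro p hp
      rcases Nat.lt_or_ge p m with hpm | hpm
      · rw [getD_set_ne2 _ _ _ _ _ (hSne m p (by omega) (by omega) (by omega))]
        exact ihget p hpm
      · have : p = m := by omega
        subst this
        exact getD_set_self2 _ _ _ _ (by rw [ihlen]; exact hSlt p (by omega))

theorem kasaiH_eq (cs : List Char) (i j : Nat) :
    ∀ (d h : Nat), lcpLen (sfx cs i) (sfx cs j) - h ≤ d →
      h ≤ lcpLen (sfx cs i) (sfx cs j) → kasaiH cs i j h = lcpLen (sfx cs i) (sfx cs j) := by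
  intro d
  induction d with
  | zero =>
    intro h hd hle
    have : h = lcpLen (sfx cs i) (sfx cs j) := by omega
    subst this
    rw [kasaiH, if_neg]
    exact lcpLen_sfx_stop cs i j
  | succ d ihd =>
    intro h hd hle
    rcases Nat.lt_or_ge h (lcpLen (sfx cs i) (sfx cs j)) with hlt | hge
    · rw [kasaiH, if_pos (lcpLen_sfx_lt cs i j h hlt)]
      exact ihd (h + 1) (by omega) (by omega)
    · have : h = lcpLen (sfx cs i) (sfx cs j) := by omega
      subst this
      rw [kasaiH, if_neg]
      exact lcpLen_sfx_stop cs i j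

theorem kasaiRank_spec (cs : List Char) (sa : List Nat) (hperm : sa.Perm (List.range cs.length)) :
    (kasaiRank cs.length sa).length = cs.length ∧
    (∀ p, p < cs.length → (kasaiRank cs.length sa).getD (sa.getD p 0) 0 = p) := by
  have hlen : sa.length = cs.length := by rw [hperm.length_eq, List.length_range]
  have hnodup : sa.Nodup := hperm.nodup_iff.2 (List.nodup_range)
  have hmem : ∀ x ∈ sa, x < cs.length := by
    intro x hx
    simpa using hperm.mem_iff.1 hx
  have := kasaiRank_aux cs sa hlen hnodup hmem cs.length (le_refl _)
  exact ⟨this.1, fun p hp => this.2 p hp⟩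

-- neighbour-lcp bounds used by Kasai's h-carryover
theorem kasai_K1 (cs : List Char) (sa rk : List Nat)
    (hsaD : ∀ p, p < cs.length → sa.getD p 0 < cs.length)
    (hsortD : ∀ p q, p < q → q < cs.length → sfx cs (sa.getD p 0) < sfx cs (sa.getD q 0))
    (hinv : ∀ i, i < cs.length → rk.getD i 0 < cs.length ∧ sa.getD (rk.getD i 0) 0 = i)
    (i : Nat) (hi : i < cs.length) (hi1 : i + 1 < cs.length)
    (h0 : 0 < rk.getD i 0) (h1 : 0 < rk.getD (i + 1) 0) :
    lcpLen (sfx cs (sa.getD (rk.getD i 0 - 1) 0)) (sfx cs i)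
      ≤ lcpLen (sfx cs (sa.getD (rk.getD (i + 1) 0 - 1) 0)) (sfx cs (i + 1)) + 1 := by
  set j := sa.getD (rk.getD i 0 - 1) 0 with hj
  set ell := lcpLen (sfx cs j) (sfx cs i) with hell
  rcases Nat.lt_or_ge ell 2 with hl2 | hl2
  · omega
  · have hjlt : j < cs.length := hsaD _ (by have := (hinv i hi).1; omega)
    have hji : sfx cs j < sfx cs i := by
      have := hsortD (rk.getD i 0 - 1) (rk.getD i 0) (by omega) (hinv i hi).1
      rw [(hinv i hi).2] at this
      exact this
    obtain ⟨htl, hteq⟩ := sfx_tail_lt cs j i hjlt hi hji (by omega)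
    have hj1n : j + 1 < cs.length := by
      have := lcpLen_le_left (sfx cs j) (sfx cs i)
      rw [← hell] at this
      simp only [sfx, List.length_drop] at this
      omega
    have horder : rk.getD (j + 1) 0 < rk.getD (i + 1) 0 := by
      rcases lt_trichotomy (rk.getD (j + 1) 0) (rk.getD (i + 1) 0) with h | h | h
      · exact h
      · exfalso
        have e1 := (hinv (j+1) hj1n).2
        rw [h, (hinv (i+1) hi1).2] at e1
        have hj_eq : j = i := by omega
        rw [hj_eq] at hji
        exact absurd hji (lt_irrefl _)
      · have := hsortD (rk.getD (i + 1) 0) (rk.getD (j + 1) 0) h (hinv (j+1) hj1n).1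
        rw [(hinv (j+1) hj1n).2, (hinv (i+1) hi1).2] at this
        exact absurd (this.trans htl) (lt_irrefl _)
    set p := sa.getD (rk.getD (i + 1) 0 - 1) 0 with hp
    have hple : sfx cs (j + 1) ≤ sfx cs p := by
      rcases lt_or_eq_of_le (by omega : rk.getD (j + 1) 0 ≤ rk.getD (i + 1) 0 - 1) with h | h
      · have := hsortD (rk.getD (j + 1) 0) (rk.getD (i + 1) 0 - 1) h
          (by have := (hinv (i+1) hi1).1; omega)
        rw [(hinv (j+1) hj1n).2] at this
        exact le_of_lt this
      · rw [hp, ← h, (hinv (j+1) hj1n).2]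
    have hplt : sfx cs p < sfx cs (i + 1) := by
      have := hsortD (rk.getD (i + 1) 0 - 1) (rk.getD (i + 1) 0) (by omega) (hinv (i+1) hi1).1
      rw [(hinv (i+1) hi1).2] at this
      exact this
    have := lcpLen_between (sfx cs (j + 1)) (sfx cs p) (sfx cs (i + 1)) hple (le_of_lt hplt)
    omega

theorem kasai_K2 (cs : List Char) (sa rk : List Nat)
    (hsaD : ∀ p, p < cs.length → sa.getD p 0 < cs.length)
    (hsortD : ∀ p q, p < q → q < cs.length → sfx cs (sa.getD p 0) < sfx cs (sa.getD q 0))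
    (hinv : ∀ i, i < cs.length → rk.getD i 0 < cs.length ∧ sa.getD (rk.getD i 0) 0 = i)
    (i : Nat) (hi : i < cs.length) (hi1 : i + 1 < cs.length)
    (h0 : 0 < rk.getD i 0) (h1 : rk.getD (i + 1) 0 = 0) :
    lcpLen (sfx cs (sa.getD (rk.getD i 0 - 1) 0)) (sfx cs i) ≤ 1 := by
  set j := sa.getD (rk.getD i 0 - 1) 0 with hj
  set ell := lcpLen (sfx cs j) (sfx cs i) with hell
  by_contra hc
  have hl2 : 2 ≤ ell := by omega
  have hjlt : j < cs.length := hsaD _ (by have := (hinv i hi).1; omega)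
  have hji : sfx cs j < sfx cs i := by
    have := hsortD (rk.getD i 0 - 1) (rk.getD i 0) (by omega) (hinv i hi).1
    rw [(hinv i hi).2] at this
    exact this
  obtain ⟨htl, hteq⟩ := sfx_tail_lt cs j i hjlt hi hji (by omega)
  have hj1n : j + 1 < cs.length := by
    have := lcpLen_le_left (sfx cs j) (sfx cs i)
    rw [← hell] at this
    simp only [sfx, List.length_drop] at this
    omega
  have hj1ne : rk.getD (j + 1) 0 ≠ 0 := by
    intro h
    have e1 := (hinv (j+1) hj1n).2
    have e2 := (hinv (i+1) hi1).2
    rw [h] at e1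
    rw [h1] at e2
    have : j + 1 = i + 1 := by rw [← e1, ← e2]
    rw [this] at htl
    exact absurd htl (lt_irrefl _)
  have := hsortD (rk.getD (i + 1) 0) (rk.getD (j + 1) 0) (by omega) (hinv (j+1) hj1n).1
  rw [(hinv (j+1) hj1n).2, (hinv (i+1) hi1).2] at this
  exact absurd (this.trans htl) (lt_irrefl _)

def kasaiFold (cs : List Char) (sa rk : List Nat) (m : Nat) : List Nat × Nat :=
  (List.range m).foldl (fun st i =>
      if 0 < rk.getD i 0 then
        let j := sa.getD (rk.getD i 0 - 1) 0
        let h' := kasaiH cs i j st.2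
        (st.1.set (rk.getD i 0) h', if 0 < h' then h' - 1 else h')
      else st) (List.replicate cs.length 0, 0)

theorem kasaiLoop_aux (cs : List Char) (sa rk : List Nat)
    (hsaD : ∀ p, p < cs.length → sa.getD p 0 < cs.length)
    (hsortD : ∀ p q, p < q → q < cs.length → sfx cs (sa.getD p 0) < sfx cs (sa.getD q 0))
    (hinv : ∀ i, i < cs.length → rk.getD i 0 < cs.length ∧ sa.getD (rk.getD i 0) 0 = i) :
    ∀ m, m ≤ cs.length →
    (kasaiFold cs sa rk m).1.length = cs.length
    ∧ (∀ i, i < m → 0 < rk.getD i 0 → (kasaiFold cs sa rk m).1.getD (rk.getD i 0) 0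
        = lcpLen (sfx cs (sa.getD (rk.getD i 0 - 1) 0)) (sfx cs i))
    ∧ (∀ r, r < cs.length → (∀ i, i < m → ¬(0 < rk.getD i 0 ∧ rk.getD i 0 = r)) →
        (kasaiFold cs sa rk m).1.getD r 0 = 0)
    ∧ (m < cs.length →
        (0 < rk.getD m 0 → (kasaiFold cs sa rk m).2
            ≤ lcpLen (sfx cs (sa.getD (rk.getD m 0 - 1) 0)) (sfx cs m))
        ∧ (rk.getD m 0 = 0 → (kasaiFold cs sa rk m).2 = 0)) := by
  have hrkinj : ∀ a b, a < cs.length → b < cs.length → rk.getD a 0 = rk.getD b 0 → a = b := by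
    intro a b ha hb hab
    have e1 := (hinv a ha).2
    have e2 := (hinv b hb).2
    rw [hab] at e1
    exact e1.symm.trans e2
  intro m
  induction m with
  | zero =>
    intro _
    refine ⟨by simp [kasaiFold], by omega, ?_, ?_⟩
    · intro r hr _
      simp [kasaiFold, List.getD, List.getElem?_replicate]
      split <;> simp
    · intro h0
      constructor
      · intro _
        simp [kasaiFold]
      · intro _
        simp [kasaiFold]
  | succ m ih =>
    intro hm
    obtain ⟨ihlen, ihA, ihB, ihC⟩ := ih (by omega)
    have hmn : m < cs.length := by omega
    have hstep : kasaiFold cs sa rk (m + 1) =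
        (if 0 < rk.getD m 0 then
          ((kasaiFold cs sa rk m).1.set (rk.getD m 0)
              (kasaiH cs m (sa.getD (rk.getD m 0 - 1) 0) (kasaiFold cs sa rk m).2),
            if 0 < kasaiH cs m (sa.getD (rk.getD m 0 - 1) 0) (kasaiFold cs sa rk m).2 then
              kasaiH cs m (sa.getD (rk.getD m 0 - 1) 0) (kasaiFold cs sa rk m).2 - 1
            else kasaiH cs m (sa.getD (rk.getD m 0 - 1) 0) (kasaiFold cs sa rk m).2)
        else kasaiFold cs sa rk m) := by
      unfold kasaiFold
      rw [List.range_succ, List.foldl_append, List.foldl_cons, List.foldl_nil]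
    by_cases h0 : 0 < rk.getD m 0
    · -- the guarded branch runs
      set j := sa.getD (rk.getD m 0 - 1) 0 with hjdef
      set ell := lcpLen (sfx cs j) (sfx cs m) with helldef
      have hh' : kasaiH cs m j (kasaiFold cs sa rk m).2 = ell := by
        have hle := (ihC hmn).1 h0
        rw [helldef, lcpLen_comm]
        exact kasaiH_eq cs m j _ _ (le_refl _) (by rw [lcpLen_comm]; exact hle)
      rw [hstep, if_pos h0, hh']
      have hrkm_lt : rk.getD m 0 < cs.length := (hinv m hmn).1
      refine ⟨by simp [ihlen], ?_, ?_, ?_⟩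
      · intro i hi hrki
        rcases Nat.lt_or_ge i m with him | him
        · have hne : rk.getD m 0 ≠ rk.getD i 0 := by
            intro hc
            exact absurd (hrkinj m i hmn (by omega) hc) (by omega)
          rw [getD_set_ne2 _ _ _ _ _ hne]
          exact ihA i him hrki
        · have : i = m := by omega
          subst this
          rw [getD_set_self2 _ _ _ _ (by rw [ihlen]; exact hrkm_lt)]
      · intro r hr hcond
        have hne : rk.getD m 0 ≠ r := by
          intro hc
          exact (hcond m (by omega)) ⟨h0, hc⟩
        rw [getD_set_ne2 _ _ _ _ _ hne]
        exact ihB r hr (fun i hi => hcond i (by omega))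
      · intro hm1
        constructor
        · intro h1
          have := kasai_K1 cs sa rk hsaD hsortD hinv m hmn hm1 h0 h1
          rw [← hjdef, ← helldef] at this
          split <;> omega
        · intro h1
          have := kasai_K2 cs sa rk hsaD hsortD hinv m hmn hm1 h0 h1
          rw [← hjdef, ← helldef] at this
          split <;> omega
    · rw [hstep, if_neg h0]
      have hz : (kasaiFold cs sa rk m).2 = 0 := (ihC hmn).2 (by omega)
      refine ⟨ihlen, ?_, ?_, ?_⟩
      · intro i hi hrki
        have : i < m := by
          rcases Nat.lt_or_ge i m with h | h
          · exact h
          · have : i = m := by omega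
            subst this
            omega
        exact ihA i this hrki
      · intro r hr hcond
        exact ihB r hr (fun i hi => hcond i (by omega))
      · intro hm1
        rw [hz]
        exact ⟨fun _ => Nat.zero_le _, fun _ => rfl⟩

theorem kasaiLcp_spec (cs : List Char) (sa : List Nat) (hperm : sa.Perm (List.range cs.length))
    (hsorted : sa.Pairwise (fun a b => sfx cs a < sfx cs b)) :
    (kasaiLcp cs sa).length = cs.length ∧
    (kasaiLcp cs sa).getD 0 0 = 0 ∧
    (∀ r, 1 ≤ r → r < cs.length →
      (kasaiLcp cs sa).getD r 0 = lcpLen (sfx cs (sa.getD (r - 1) 0)) (sfx cs (sa.getD r 0))) := by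
  obtain ⟨hrklen, hrkD⟩ := kasaiRank_spec cs sa hperm
  set rk := kasaiRank cs.length sa with hrk
  have hsalen : sa.length = cs.length := by rw [hperm.length_eq, List.length_range]
  have hsaD : ∀ p, p < cs.length → sa.getD p 0 < cs.length := by
    intro p hp
    rw [List.getD_eq_getElem sa 0 (by omega)]
    have : sa[p]'(by omega) ∈ sa := List.getElem_mem _
    simpa using hperm.mem_iff.1 this
  have hsortD : ∀ p q, p < q → q < cs.length → sfx cs (sa.getD p 0) < sfx cs (sa.getD q 0) := by
    intro p q hpq hq
    have := List.pairwise_iff_getElem.1 hsorted p q (by omega) (by omega) hpq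
    rw [List.getD_eq_getElem sa 0 (by omega), List.getD_eq_getElem sa 0 (by omega)]
    exact this
  have hinv : ∀ i, i < cs.length → rk.getD i 0 < cs.length ∧ sa.getD (rk.getD i 0) 0 = i := by
    intro i hi
    have : i ∈ sa := hperm.mem_iff.2 (by simpa using hi)
    obtain ⟨p, hp, hval⟩ := List.mem_iff_getElem.1 this
    have hpD : sa.getD p 0 = i := by
      rw [List.getD_eq_getElem sa 0 hp]
      exact hval
    have := hrkD p (by omega)
    rw [hpD] at this
    rw [this]
    exact ⟨by omega, hpD⟩
  have haux := kasaiLoop_aux cs sa rk hsaD hsortD hinv cs.length (le_refl _)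
  have hport : kasaiLcp cs sa = (kasaiFold cs sa rk cs.length).1 := rfl
  rw [hport]
  refine ⟨haux.1, ?_, ?_⟩
  · by_cases hn : 0 < cs.length
    · apply haux.2.2.1 0 hn
      intro i hi
      rintro ⟨hpos, hzero⟩
      omega
    · have hlen0 := haux.1
      have hnil : (kasaiFold cs sa rk cs.length).1 = [] := List.eq_nil_of_length_eq_zero (by omega)
      rw [hnil]
      rfl
  · intro r h1 hr
    have hi : sa.getD r 0 < cs.length := hsaD r hr
    have hrkval : rk.getD (sa.getD r 0) 0 = r := hrkD r hr
    have := haux.2.1 (sa.getD r 0) hi (by rw [hrkval]; omega)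
    rw [hrkval] at this
    exact this

-- ---------- counting ----------

def prefList (v : List Char) : List (List Char) :=
  (List.range v.length).map (fun t => v.take (t + 1))

def FF (cs : List Char) (sa : List Nat) : Nat → Finset (List Char)
  | 0 => ∅
  | m + 1 => FF cs sa m ∪ (prefList (sfx cs (sa.getD m 0))).toFinset

theorem mem_prefList (v x : List Char) : x ∈ prefList v ↔ x ≠ [] ∧ x <+: v := by
  unfold prefList
  simp only [List.mem_map, List.mem_range]
  constructor
  · rintro ⟨t, ht, rfl⟩
    constructor
    · have : (v.take (t + 1)).length = min (t + 1) v.length := by simp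
      intro hc
      rw [hc] at this
      simp at this
      omega
    · exact List.take_prefix _ _
  · rintro ⟨hne, hp⟩
    have hlen : 1 ≤ x.length := by
      cases x with
      | nil => exact absurd rfl hne
      | cons a as => simp
    have hle : x.length ≤ v.length := hp.length_le
    refine ⟨x.length - 1, by omega, ?_⟩
    have : x.length - 1 + 1 = x.length := by omega
    rw [this]
    exact (List.prefix_iff_eq_take.1 hp).symm

theorem mem_FF (cs : List Char) (sa : List Nat) (m : Nat) (x : List Char) :
    x ∈ FF cs sa m ↔ ∃ r, r < m ∧ x ≠ [] ∧ x <+: sfx cs (sa.getD r 0) := by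
  induction m with
  | zero => simp [FF]
  | succ m ih =>
    simp only [FF, Finset.mem_union, ih, List.mem_toFinset, mem_prefList]
    constructor
    · rintro (⟨r, hr, h1, h2⟩ | ⟨h1, h2⟩)
      · exact ⟨r, by omega, h1, h2⟩
      · exact ⟨m, by omega, h1, h2⟩
    · rintro ⟨r, hr, h1, h2⟩
      rcases Nat.lt_or_ge r m with h | h
      · exact Or.inl ⟨r, h, h1, h2⟩
      · have : r = m := by omega
        subst this
        exact Or.inr ⟨h1, h2⟩

theorem sum_range_getD (l : List Nat) (g : Nat → Nat) :
    ∑ r ∈ Finset.range l.length, g (l.getD r 0) = (l.map g).sum := by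
  induction l with
  | nil => simp
  | cons a as ih =>
    rw [List.length_cons, Finset.sum_range_succ']
    simp only [List.getD_cons_succ, List.getD_cons_zero, List.map_cons, List.sum_cons, ih]
    omega

theorem gauss_sum (n : Nat) : ∑ i ∈ Finset.range n, (n - i) = n * (n + 1) / 2 := by
  have h1 := Finset.sum_range_reflect (fun j => n - j) n
  have h2 : ∑ j ∈ Finset.range n, (n - (n - 1 - j)) = ∑ j ∈ Finset.range n, (j + 1) := by
    apply Finset.sum_congr rfl
    intro j hj
    rw [Finset.mem_range] at hj
    omega
  rw [h2] at h1
  rw [← h1]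
  have h3 : ∑ j ∈ Finset.range n, (j + 1) = (∑ j ∈ Finset.range n, j) + n := by
    rw [Finset.sum_add_distrib]
    simp
  rw [h3]
  have h4 := Finset.sum_range_id_mul_two n
  have h5 : n * (n + 1) = n * (n - 1) + 2 * n := by
    cases n with
    | zero => simp
    | succ k =>
      simp only [Nat.add_sub_cancel]
      ring
  omega

theorem FF_step (cs : List Char) (sa : List Nat)
    (hsaD : ∀ p, p < cs.length → sa.getD p 0 < cs.length)
    (hsortD : ∀ p q, p < q → q < cs.length → sfx cs (sa.getD p 0) < sfx cs (sa.getD q 0))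
    (m : Nat) (hm : m < cs.length) (ell : Nat)
    (hell0 : m = 0 → ell = 0)
    (hell1 : 1 ≤ m → ell = lcpLen (sfx cs (sa.getD (m - 1) 0)) (sfx cs (sa.getD m 0))) :
    (FF cs sa (m + 1)).card + ell = (FF cs sa m).card + (cs.length - sa.getD m 0) := by
  set v := sfx cs (sa.getD m 0) with hv
  have hvlen : v.length = cs.length - sa.getD m 0 := by simp [hv, sfx]
  have hellle : ell ≤ v.length := by
    rcases Nat.eq_zero_or_pos m with h | h
    · rw [hell0 h]
      omega
    · rw [hell1 h]
      exact lcpLen_le_right _ _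
  have hsplit : ∀ x, x ∈ (prefList v).toFinset → (x ∈ FF cs sa m ↔ x.length ≤ ell) := by
    intro x hxP
    rw [List.mem_toFinset, mem_prefList] at hxP
    obtain ⟨hxne, hxpre⟩ := hxP
    have hxlen : 1 ≤ x.length := by
      cases x with
      | nil => exact absurd rfl hxne
      | cons a as => simp
    constructor
    · intro hxF
      rw [mem_FF] at hxF
      obtain ⟨r, hr, -, hxr⟩ := hxF
      have hm1 : 1 ≤ m := by omega
      rw [hell1 hm1]
      have h1 : x.length ≤ lcpLen (sfx cs (sa.getD r 0)) v :=
        ((prefix_both_iff (sfx cs (sa.getD r 0)) v x).1 ⟨hxr, hxpre⟩).2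
      have h2 : sfx cs (sa.getD r 0) ≤ sfx cs (sa.getD (m - 1) 0) := by
        rcases lt_or_eq_of_le (by omega : r ≤ m - 1) with h | h
        · exact le_of_lt (hsortD r (m - 1) h (by omega))
        · rw [h]
      have h3 : sfx cs (sa.getD (m - 1) 0) ≤ v := le_of_lt (hsortD (m - 1) m (by omega) hm)
      exact le_trans h1 (lcpLen_between _ _ _ h2 h3)
    · intro hxle
      have hm1 : 1 ≤ m := by
        by_contra hc
        have := hell0 (by omega)
        omega
      rw [mem_FF]
      refine ⟨m - 1, by omega, hxne, ?_⟩
      rw [hell1 hm1] at hxle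
      exact ((prefix_both_iff v (sfx cs (sa.getD (m - 1) 0)) x).2
        ⟨hxpre, by rw [lcpLen_comm]; exact hxle⟩).2
  set ql := (List.range' (ell + 1) (v.length - ell)).map (fun t => v.take t) with hql
  have hqlen : ∀ t, t ∈ List.range' (ell + 1) (v.length - ell) → (v.take t).length = t := by
    intro t ht
    rw [List.mem_range'_1] at ht
    simp
    omega
  have hqnodup : ql.Nodup := by
    refine List.Nodup.map_on ?_ (List.nodup_range')
    intro t1 h1 t2 h2 heq
    have := hqlen t1 h1
    rw [heq, hqlen t2 h2] at this
    omega
  have hQeq : ql.toFinset = (prefList v).toFinset \ FF cs sa m := by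
    ext x
    rw [List.mem_toFinset, Finset.mem_sdiff, hql, List.mem_map]
    constructor
    · rintro ⟨t, ht, rfl⟩
      have htl := hqlen t ht
      rw [List.mem_range'_1] at ht
      have hxP : v.take t ∈ (prefList v).toFinset := by
        simp only [List.mem_toFinset, mem_prefList]
        refine ⟨?_, List.take_prefix _ _⟩
        intro hc
        have := congrArg List.length hc
        rw [htl] at this
        simp at this
        omega
      refine ⟨hxP, ?_⟩
      intro hc
      have := (hsplit _ hxP).1 hc
      rw [htl] at this
      omega
    · rintro ⟨hxP, hxF⟩
      have hxP' := hxP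
      simp only [List.mem_toFinset, mem_prefList] at hxP'
      obtain ⟨hxne, hxpre⟩ := hxP'
      have hgt : ell < x.length := by
        by_contra hc
        exact hxF ((hsplit x hxP).2 (by omega))
      refine ⟨x.length, ?_, (List.prefix_iff_eq_take.1 hxpre).symm⟩
      rw [List.mem_range'_1]
      have := hxpre.length_le
      omega
  have hcard : (FF cs sa (m + 1)).card = (FF cs sa m).card + (v.length - ell) := by
    have hFF : FF cs sa (m + 1) = FF cs sa m ∪ (prefList v).toFinset := rfl
    rw [hFF, ← Finset.union_sdiff_self_eq_union, Finset.card_union_of_disjoint Finset.disjoint_sdiff,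
        ← hQeq, List.toFinset_card_of_nodup hqnodup]
    rw [hql, List.length_map, List.length_range']
  omega

theorem mem_subSlices (cs : List Char) (x : List Char) :
    x ∈ subSlices cs ↔ x ≠ [] ∧ ∃ i, i < cs.length ∧ x <+: sfx cs i := by
  unfold subSlices
  constructor
  · intro hx
    rw [List.mem_flatMap] at hx
    obtain ⟨i, hi, hx⟩ := hx
    rw [List.mem_range] at hi
    rw [List.mem_map] at hx
    obtain ⟨j, hj, rfl⟩ := hx
    rw [List.mem_range'_1] at hj
    rw [PySem.List.slice_natCast]
    constructor
    · intro hc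
      have := congrArg List.length hc
      simp at this
      omega
    · exact ⟨i, hi, List.take_prefix _ _⟩
  · rintro ⟨hne, i, hi, hpre⟩
    have hlen1 : 1 ≤ x.length := by
      cases x with
      | nil => exact absurd rfl hne
      | cons a as => simp
    have hlen2 : x.length ≤ cs.length - i := by
      have := hpre.length_le
      simpa [sfx] using this
    rw [List.mem_flatMap]
    refine ⟨i, by rw [List.mem_range]; exact hi, ?_⟩
    rw [List.mem_map]
    refine ⟨i + x.length, by rw [List.mem_range'_1]; omega, ?_⟩
    rw [PySem.List.slice_natCast]
    have : i + x.length - i = x.length := by omega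
    rw [this]
    exact (List.prefix_iff_eq_take.1 hpre).symm

theorem main_count (cs : List Char) (sa : List Nat) (hperm : sa.Perm (List.range cs.length))
    (hsorted : sa.Pairwise (fun a b => sfx cs a < sfx cs b)) (lcp : List Nat)
    (hlen : lcp.length = cs.length) (h0 : lcp.getD 0 0 = 0)
    (hr : ∀ r, 1 ≤ r → r < cs.length →
      lcp.getD r 0 = lcpLen (sfx cs (sa.getD (r - 1) 0)) (sfx cs (sa.getD r 0))) :
    (subSlices cs).toFinset.card + lcp.sum = cs.length * (cs.length + 1) / 2 := by
  have hsalen : sa.length = cs.length := by rw [hperm.length_eq, List.length_range]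
  have hsaD : ∀ p, p < cs.length → sa.getD p 0 < cs.length := by
    intro p hp
    rw [List.getD_eq_getElem sa 0 (by omega)]
    have : sa[p]'(by omega) ∈ sa := List.getElem_mem _
    simpa using hperm.mem_iff.1 this
  have hsortD : ∀ p q, p < q → q < cs.length → sfx cs (sa.getD p 0) < sfx cs (sa.getD q 0) := by
    intro p q hpq hq
    have := List.pairwise_iff_getElem.1 hsorted p q (by omega) (by omega) hpq
    rw [List.getD_eq_getElem sa 0 (by omega), List.getD_eq_getElem sa 0 (by omega)]
    exact this
  have htel : ∀ m, m ≤ cs.length →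
      (FF cs sa m).card + ∑ r ∈ Finset.range m, lcp.getD r 0
        = ∑ r ∈ Finset.range m, (cs.length - sa.getD r 0) := by
    intro m
    induction m with
    | zero => simp [FF]
    | succ m ih =>
      intro hm
      have hstep := FF_step cs sa hsaD hsortD m (by omega) (lcp.getD m 0)
        (fun hm0 => by rw [hm0]; exact h0)
        (fun hm1 => hr m hm1 (by omega))
      rw [Finset.sum_range_succ, Finset.sum_range_succ]
      have := ih (by omega)
      omega
  have hFFn : FF cs sa cs.length = (subSlices cs).toFinset := by
    ext x
    rw [mem_FF, List.mem_toFinset, mem_subSlices]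
    constructor
    · rintro ⟨r, hr', h1, h2⟩
      exact ⟨h1, sa.getD r 0, hsaD r hr', h2⟩
    · rintro ⟨h1, i, hi, h2⟩
      have : i ∈ sa := hperm.mem_iff.2 (by simpa using hi)
      obtain ⟨p, hp, hval⟩ := List.mem_iff_getElem.1 this
      refine ⟨p, by omega, h1, ?_⟩
      rw [List.getD_eq_getElem sa 0 hp, hval]
      exact h2
  have hsum1 : ∑ r ∈ Finset.range cs.length, lcp.getD r 0 = lcp.sum := by
    have h := sum_range_getD lcp id
    simp only [id_eq, List.map_id] at h
    rw [← hlen]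
    exact h
  have hsum2 : ∑ r ∈ Finset.range cs.length, (cs.length - sa.getD r 0)
      = cs.length * (cs.length + 1) / 2 := by
    rw [show Finset.range cs.length = Finset.range sa.length from by rw [hsalen]]
    rw [sum_range_getD sa (fun x => cs.length - x)]
    have hps : (sa.map (fun x => cs.length - x)).sum
        = ((List.range cs.length).map (fun x => cs.length - x)).sum :=
      (hperm.map _).sum_eq
    rw [hps]
    have : ((List.range cs.length).map (fun x => cs.length - x)).sum
        = ∑ r ∈ Finset.range cs.length, (cs.length - r) := by
      rw [← sum_range_getD (List.range cs.length) (fun x => cs.length - x), List.length_range]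
      apply Finset.sum_congr rfl
      intro r hrr
      rw [Finset.mem_range] at hrr
      rw [List.getD_eq_getElem _ 0 (by simpa using hrr), List.getElem_range]
    rw [this, gauss_sum]
  have := htel cs.length (le_refl _)
  rw [hFFn, hsum1, hsum2] at this
  exact this

theorem ofList_length_eq_card (xs : List (List Char)) :
    (PySem.Set.ofList xs).length = xs.toFinset.card := by
  rw [← List.toFinset_card_of_nodup (PySem.Set.nodup_ofList xs)]
  congr 1
  ext a
  simp [PySem.Set.mem_ofList]

-- ---------- the crux: A's count equals the number of distinct substrings ----------

theorem main_crux (cs : List Char) :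
    countDistinct cs = ((PySem.Set.ofList (subSlices cs)).length : Int) := by
  unfold countDistinct
  dsimp only
  by_cases hn : cs.length = 0
  · rw [if_pos hn]
    have : cs = [] := List.length_eq_zero_iff.1 hn
    subst this
    rfl
  · rw [if_neg hn]
    obtain ⟨hsap, hsas⟩ := buildSuffixArray_spec cs
    obtain ⟨hl1, hl2, hl3⟩ := kasaiLcp_spec cs (buildSuffixArray cs) hsap hsas
    have hmc := main_count cs (buildSuffixArray cs) hsap hsas (kasaiLcp cs (buildSuffixArray cs))
      hl1 hl2 hl3
    rw [ofList_length_eq_card]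
    have hfd : PySem.Int.floordiv ((cs.length : Int) * ((cs.length : Int) + 1)) 2
        = ((cs.length * (cs.length + 1) / 2 : Nat) : Int) := by
      have hcast : (cs.length : Int) * ((cs.length : Int) + 1) = ((cs.length * (cs.length + 1) : Nat) : Int) := by
        push_cast
        ring
      rw [hcast]
      exact_mod_cast PySem.Int.floordiv_natCast (cs.length * (cs.length + 1)) 2
    rw [hfd]
    have hcs : ((kasaiLcp cs (buildSuffixArray cs)).map (fun (x : Nat) => (x : Int))).sum
        = ((kasaiLcp cs (buildSuffixArray cs)).sum : Int) := (Nat.cast_list_sum _).symm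
    rw [hcs]
    omega

theorem inter_diff_split (xs ys : List (List Char)) :
    ((PySem.Set.ofList xs).inter (PySem.Set.ofList ys)).length
      + ((PySem.Set.ofList xs).diff (PySem.Set.ofList ys)).length
      = (PySem.Set.ofList xs).length := by
  unfold PySem.Set.inter PySem.Set.diff
  exact (List.length_eq_length_filter_add _).symm

-- ===== VERDICT (by name: the statement is the Claim_ definition above) =====
theorem subSlicesB_eq (cs : List Char) : subSlicesB cs = subSlices cs := rfl

theorem diff_substrings_two_strings_spec : Claim_equal_diff_substrings_two_strings := by
  intro s1 s2 _
  unfold Spec_diff_substrings_two_strings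
  unfold diff_substrings_two_strings diff_substrings_two_strings_alt
  rw [subSlicesB_eq, subSlicesB_eq]
  have h := main_crux s1.toList
  have h2 := inter_diff_split (subSlices s1.toList) (subSlices s2.toList)
  simp only [h, PySem.Set.len_eq]
  omega
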